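-- pv_equiv track=rewrite | github.com/jiaju-yang/leetcode | src/q74-search-a-2-d-matrix.py | which_row
-- ===== SOURCE A (Python) =====
-- def which_row(matrix, target):
--     m = len(matrix)
--     left, right = 0, m-1
--     while left <= right:
--         middle = (left + right) >> 1
--         if target >= matrix[right][0]:
--             return right
--         elif target < matrix[middle][0]:
--             right = middle - 1
--         elif right - left == 1:
--             return left
--         else:
--             left = middle
--     return middle
-- ===== SOURCE B (Python) =====
-- def which_row(matrix, target):
--     # Backward linear scan: first row index from the end whose first
--     # element is <= target; 0 if every first element exceeds target.
--     for i in range(len(matrix) - 1, -1, -1):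
--         if target >= matrix[i][0]:
--             return i
--     return 0
-- ===== Notes on version B (the rewrite author's own statement) =====
-- stated objective: simpler
-- what changed: Replaces the iterative two-pointer binary search (left/right/middle state) with a single backward linear scan that returns the first row index from the end whose first element is <= target, else 0.
-- outside the precondition, e.g. on which_row([[-2], [-1], [-2], [-1]], -2): A returns 0, B returns 2; on which_row([[0], [2], [0], [], [-1]], -2): A returns 0, B raises IndexError
import Mathlib
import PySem

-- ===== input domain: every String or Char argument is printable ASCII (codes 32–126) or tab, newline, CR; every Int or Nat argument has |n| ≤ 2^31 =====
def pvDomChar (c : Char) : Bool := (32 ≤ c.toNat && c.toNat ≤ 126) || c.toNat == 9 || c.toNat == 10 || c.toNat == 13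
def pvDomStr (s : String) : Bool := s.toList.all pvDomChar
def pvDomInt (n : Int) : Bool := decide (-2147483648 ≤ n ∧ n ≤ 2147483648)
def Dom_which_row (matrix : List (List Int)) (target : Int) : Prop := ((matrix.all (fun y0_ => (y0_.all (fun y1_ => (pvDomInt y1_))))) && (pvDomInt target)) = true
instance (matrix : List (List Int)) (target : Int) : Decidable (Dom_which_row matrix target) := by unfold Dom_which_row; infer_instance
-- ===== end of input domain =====

-- B replaces A's two-pointer binary search by a backward linear scan (simpler, not faster);
-- A = B on Pre_ (nonempty matrix, nonempty rows, answer not a binary-search path accident).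

-- ===== PORT A =====
-- matrix[i][0] as a total function; exact under Pre_ (index in range, row nonempty).
def pvHead0 (matrix : List (List Int)) (i : Int) : Int :=
  PySem.List.pyGetD (PySem.List.pyGetD matrix i []) 0 0

-- the while-loop of A; fuel = matrix.length + 1 bounds the iterations (right - left shrinks
-- every turn); the fuel-0 value is never reached when the loop is entered with right < length.
def whichRowGo (matrix : List (List Int)) (target : Int) : Nat → Int → Int → Int → Int
  | 0, _, _, middle => middle
  | fuel+1, left, right, middle =>
    if left ≤ right then
      let mid := PySem.Int.floordiv (left + right) 2   -- (left + right) >> 1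
      if pvHead0 matrix right ≤ target then right
      else if target < pvHead0 matrix mid then whichRowGo matrix target fuel left (mid - 1) mid
      else if right - left = 1 then left
      else whichRowGo matrix target fuel mid right mid
    else middle

def which_row (matrix : List (List Int)) (target : Int) : Int :=
  whichRowGo matrix target (matrix.length + 1) 0 ((matrix.length : Int) - 1) 0

-- ===== PORT B =====
-- 'for i in range(len(matrix)-1, -1, -1)', counting down; at i = 0 both the hit and the
-- fall-through of Source B's loop return 0.
def whichRowAltGo (matrix : List (List Int)) (target : Int) : Nat → Int
  | 0 => if pvHead0 matrix 0 ≤ target then 0 else 0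
  | i+1 => if pvHead0 matrix ((i : Int) + 1) ≤ target then (i : Int) + 1 else whichRowAltGo matrix target i

def which_row_alt (matrix : List (List Int)) (target : Int) : Int :=
  match matrix.length with
  | 0 => 0
  | n+1 => whichRowAltGo matrix target n

-- ===== PRECONDITION & SPEC =====
-- Pre_ excludes matrices with an empty row or no rows (A raises IndexError/UnboundLocalError when
-- it touches them, and where A still returns, B may not) and matrices of more than two rows whose
-- first column is unsorted with target strictly between its minimum and its last entry: there the
-- binary search's answer is a path accident of A's implementation on input that violates the
-- function's sortedness contract, as defensible as any other; every input whose answer is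
-- determined stays inside (sorted first column, target ≥ last head, target below every head, ≤ 2 rows).
def Pre_which_row (matrix : List (List Int)) (target : Int) : Prop :=
  matrix ≠ [] ∧ (∀ r ∈ matrix, r ≠ []) ∧
  (matrix.length ≤ 2
    ∨ List.Pairwise (· ≤ ·) (matrix.map fun r => r.headD 0)
    ∨ (matrix.map fun r => r.headD 0).getLastD 0 ≤ target
    ∨ ∀ x ∈ matrix.map (fun r => r.headD 0), target < x)
instance (matrix : List (List Int)) (target : Int) : Decidable (Pre_which_row matrix target) := by
  unfold Pre_which_row; infer_instance

def pvWitness_which_row : List (List Int) × Int := ([[1], [3], [5]], 3)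

def Spec_which_row (matrix : List (List Int)) (target : Int) (out : Int) : Prop := out = which_row_alt matrix target
instance (matrix : List (List Int)) (target : Int) (out : Int) : Decidable (Spec_which_row matrix target out) := by unfold Spec_which_row; infer_instance

-- ===== CLAIM (what is proved, stated in full; the proofs are below) =====
def Claim_equal_which_row : Prop := ∀ (matrix : List (List Int)) (target : Int), Dom_which_row matrix target → Pre_which_row matrix target → Spec_which_row matrix target (which_row matrix target)

-- ===== LEMMAS AND PROOFS =====

-- the first column of the matrix, indexed totally
def pvC (matrix : List (List Int)) (j : Nat) : Int :=
  (matrix.map fun r => r.headD 0).getD j 0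

theorem pvHead0_eq (matrix : List (List Int)) (i : Int)
    (h0 : 0 ≤ i) (h1 : i < (matrix.length : Int)) :
    pvHead0 matrix i = pvC matrix i.toNat := by
  unfold pvHead0 pvC
  rw [PySem.List.pyGetD_eq_getElem matrix [] h0 h1,
      PySem.List.pyGetD_zero]
  have hlt : i.toNat < matrix.length := by omega
  have hR : (matrix.map fun r => r.headD 0).getD i.toNat 0 = matrix[i.toNat].headD 0 := by
    rw [List.getD_eq_getElem _ _ (by simpa using hlt)]
    simp
  rw [hR]
  generalize matrix[i.toNat] = row
  cases row <;> simp [List.getD]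

theorem pvC_mono (matrix : List (List Int)) {j k : Nat}
    (hs : List.Pairwise (· ≤ ·) (matrix.map fun r => r.headD 0))
    (hjk : j ≤ k) (hk : k < matrix.length) :
    pvC matrix j ≤ pvC matrix k := by
  rcases eq_or_lt_of_le hjk with rfl | hlt
  · exact le_refl _
  · unfold pvC
    have hj' : j < (matrix.map fun r => r.headD 0).length := by simp; omega
    have hk' : k < (matrix.map fun r => r.headD 0).length := by simp; omega
    rw [List.getD_eq_getElem _ _ hj', List.getD_eq_getElem _ _ hk']
    exact List.pairwise_iff_getElem.mp hs j k hj' hk' hlt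

-- B returns k when row k is a hit and every row after it (up to i) is a miss
theorem alt_hit (matrix : List (List Int)) (t : Int) (i k : Nat)
    (hki : k ≤ i) (him : i < matrix.length)
    (hk : pvC matrix k ≤ t) (habove : ∀ j, k < j → j ≤ i → t < pvC matrix j) :
    whichRowAltGo matrix t i = (k : Int) := by
  induction i with
  | zero =>
    interval_cases k
    simp only [whichRowAltGo]
    have h0 : pvHead0 matrix 0 = pvC matrix 0 := by
      have := pvHead0_eq matrix 0 (by omega) (by exact_mod_cast him)
      simpa using this
    simp [h0, hk]
  | succ n ih =>
    simp only [whichRowAltGo]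
    have he : pvHead0 matrix ((n : Int) + 1) = pvC matrix (n+1) := by
      have := pvHead0_eq matrix ((n : Int) + 1) (by omega) (by exact_mod_cast him)
      simpa using this
    rcases Nat.eq_or_lt_of_le hki with rfl | hlt
    · rw [he, if_pos hk]; push_cast; ring
    · have hmiss : t < pvC matrix (n+1) := habove (n+1) (by omega) (by omega)
      rw [he, if_neg (by omega)]
      exact ih (by omega) (by omega) (fun j hj1 hj2 => habove j hj1 (by omega))

-- B returns 0 when every row up to i is a miss
theorem alt_miss (matrix : List (List Int)) (t : Int) (i : Nat)
    (him : i < matrix.length)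
    (hm : ∀ j, j ≤ i → t < pvC matrix j) :
    whichRowAltGo matrix t i = 0 := by
  induction i with
  | zero => simp [whichRowAltGo]
  | succ n ih =>
    simp only [whichRowAltGo]
    have he : pvHead0 matrix ((n : Int) + 1) = pvC matrix (n+1) := by
      have := pvHead0_eq matrix ((n : Int) + 1) (by omega) (by exact_mod_cast him)
      simpa using this
    rw [he, if_neg (by have := hm (n+1) (le_refl _); omega)]
    exact ih (by omega) (fun j hj => hm j (by omega))

-- A's loop returns 0 when target is below every first element (left stays 0, right collapses)
theorem a_zero (matrix : List (List Int)) (t : Int)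
    (hall : ∀ j : Nat, j < matrix.length → t < pvC matrix j) :
    ∀ fuel : Nat, ∀ r middle : Int, 0 ≤ r → r < (matrix.length : Int) →
      r.toNat + 2 ≤ fuel → whichRowGo matrix t fuel 0 r middle = 0 := by
  intro fuel
  induction fuel with
  | zero => intro r middle h0 h1 h2; omega
  | succ f ih =>
    intro r middle h0 h1 hf
    have hmid := PySem.Int.floordiv_two_mid_bounds (show (0:Int) ≤ r from h0)
    simp only [whichRowGo, if_pos h0]
    set mid := PySem.Int.floordiv (0 + r) 2 with hmiddef
    have hmid0 : 0 ≤ mid := by simpa using hmid.1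
    have hmidr : mid ≤ r := by simpa using hmid.2
    have hr : pvHead0 matrix r = pvC matrix r.toNat := pvHead0_eq matrix r h0 h1
    have hm : pvHead0 matrix mid = pvC matrix mid.toNat := pvHead0_eq matrix mid hmid0 (by omega)
    rw [hr, if_neg (by have := hall r.toNat (by omega); omega),
        hm, if_pos (by have := hall mid.toNat (by omega); omega)]
    by_cases hc : 0 ≤ mid - 1
    · exact ih (mid - 1) mid hc (by omega) (by omega)
    · have hz : mid = 0 := by omega
      rw [hz]
      obtain ⟨f', rfl⟩ : ∃ f', f = f' + 1 := ⟨f - 1, by omega⟩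
      norm_num [whichRowGo]

-- the binary-search invariant on a sorted first column: left is 0 or a hit, right is the
-- last index or sits just below a miss; the loop lands on B's answer
theorem a_sorted (matrix : List (List Int)) (t : Int)
    (hs : List.Pairwise (· ≤ ·) (matrix.map fun r => r.headD 0)) :
    ∀ fuel : Nat, ∀ l r middle : Int, 0 ≤ l → l ≤ r → r < (matrix.length : Int) →
      (l = 0 ∨ pvC matrix l.toNat ≤ t) →
      (r = (matrix.length : Int) - 1 ∨ t < pvC matrix (r.toNat + 1)) →
      (r - l).toNat + 2 ≤ fuel →
      whichRowGo matrix t fuel l r middle = whichRowAltGo matrix t (matrix.length - 1) := by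
  intro fuel
  induction fuel with
  | zero => intro l r middle h0 hlr hr hL hR hf; omega
  | succ f ih =>
    intro l r middle h0 hlr hr hL hR hf
    have hm1 : 1 ≤ matrix.length := by omega
    simp only [whichRowGo, if_pos hlr]
    set mid := PySem.Int.floordiv (l + r) 2 with hmiddef
    have hb : mid * 2 ≤ l + r ∧ l + r < (mid + 1) * 2 :=
      (PySem.Int.floordiv_eq_iff_of_pos (by norm_num)).mp hmiddef.symm
    have hmidl : l ≤ mid := by omega
    have hmidr : mid ≤ r := by omega
    have hHr : pvHead0 matrix r = pvC matrix r.toNat := pvHead0_eq matrix r (by omega) hr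
    have hHm : pvHead0 matrix mid = pvC matrix mid.toNat := pvHead0_eq matrix mid (by omega) (by omega)
    by_cases hb1 : pvC matrix r.toNat ≤ t
    · rw [hHr, if_pos hb1]
      rw [alt_hit matrix t (matrix.length - 1) r.toNat (by omega) (by omega) hb1 ?_]
      · omega
      · intro j hj1 hj2
        rcases hR with h | h
        · omega
        · exact lt_of_lt_of_le h (pvC_mono matrix hs (by omega) (by omega))
    · rw [hHr, if_neg hb1]
      by_cases hb2 : t < pvC matrix mid.toNat
      · rw [hHm, if_pos hb2]
        by_cases hc : l ≤ mid - 1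
        · refine ih l (mid - 1) mid h0 hc (by omega) hL (Or.inr ?_) (by omega)
          rw [show (mid - 1).toNat + 1 = mid.toNat by omega]
          exact hb2
        · have hl0 : l = 0 := by
            rcases hL with h | h
            · exact h
            · exfalso
              have : mid = l := by omega
              rw [this] at hb2; omega
          have hmid0 : mid = 0 := by omega
          rw [hl0, hmid0]
          obtain ⟨f', rfl⟩ : ∃ f', f = f' + 1 := ⟨f - 1, by omega⟩
          norm_num [whichRowGo]
          rw [alt_miss matrix t (matrix.length - 1) (by omega) ?_]
          intro j hj
          have h0' : t < pvC matrix 0 := by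
            have : mid.toNat = 0 := by omega
            rwa [this] at hb2
          exact lt_of_lt_of_le h0' (pvC_mono matrix hs (by omega) (by omega))
      · rw [hHm, if_neg hb2]
        by_cases hd : r - l = 1
        · rw [if_pos hd]
          have hml : mid = l := by omega
          have hkt : pvC matrix l.toNat ≤ t := by rw [hml] at hb2; omega
          rw [alt_hit matrix t (matrix.length - 1) l.toNat (by omega) (by omega) hkt ?_]
          · omega
          · intro j hj1 hj2
            have : t < pvC matrix r.toNat := by omega
            exact lt_of_lt_of_le this (pvC_mono matrix hs (by omega) (by omega))
        · rw [if_neg hd]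
          have hlr2 : l + 2 ≤ r := by
            rcases eq_or_lt_of_le hlr with h | h
            · exfalso
              have hmr : mid = r := by omega
              rw [hmr] at hb2; omega
            · omega
          exact ih mid r mid (by omega) hmidr hr (Or.inr (by omega)) hR (by omega)

-- ===== VERDICT (by name: the statement is the Claim_ definition above) =====
theorem which_row_spec : Claim_equal_which_row := by
  intro matrix target _hdom hpre
  obtain ⟨hne, hrows, hdisj⟩ := hpre
  have hm1 : 1 ≤ matrix.length := by
    cases matrix with
    | nil => exact absurd rfl hne
    | cons a l => simp
  unfold Spec_which_row which_row which_row_alt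
  obtain ⟨n, hn⟩ : ∃ n, matrix.length = n + 1 := ⟨matrix.length - 1, by omega⟩
  have hmatch : (match matrix.length with
      | 0 => (0 : Int)
      | n+1 => whichRowAltGo matrix target n) = whichRowAltGo matrix target (matrix.length - 1) := by
    rw [hn]
    simp
  rw [hmatch]
  -- three workers, one per way the answer is determined
  have Hsort : List.Pairwise (· ≤ ·) (matrix.map fun r => r.headD 0) →
      whichRowGo matrix target (matrix.length + 1) 0 ((matrix.length : Int) - 1) 0
        = whichRowAltGo matrix target (matrix.length - 1) := by
    intro hs
    exact a_sorted matrix target hs (matrix.length + 1) 0 ((matrix.length : Int) - 1) 0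
      (by omega) (by omega) (by omega) (Or.inl rfl) (Or.inl rfl) (by omega)
  have Hlast : pvC matrix (matrix.length - 1) ≤ target →
      whichRowGo matrix target (matrix.length + 1) 0 ((matrix.length : Int) - 1) 0
        = whichRowAltGo matrix target (matrix.length - 1) := by
    intro hlast
    simp only [whichRowGo, if_pos (show (0:Int) ≤ (matrix.length : Int) - 1 by omega)]
    have hHr : pvHead0 matrix ((matrix.length : Int) - 1) = pvC matrix (matrix.length - 1) := by
      have := pvHead0_eq matrix ((matrix.length : Int) - 1) (by omega) (by omega)
      rwa [show ((matrix.length : Int) - 1).toNat = matrix.length - 1 by omega] at this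
    rw [hHr, if_pos hlast,
        alt_hit matrix target (matrix.length - 1) (matrix.length - 1) (le_refl _)
          (by omega) hlast (fun j hj1 hj2 => absurd (lt_of_lt_of_le hj1 hj2) (by omega))]
    omega
  have Hall : (∀ j : Nat, j < matrix.length → target < pvC matrix j) →
      whichRowGo matrix target (matrix.length + 1) 0 ((matrix.length : Int) - 1) 0
        = whichRowAltGo matrix target (matrix.length - 1) := by
    intro hall
    rw [a_zero matrix target hall (matrix.length + 1) ((matrix.length : Int) - 1) 0
          (by omega) (by omega) (by omega),
        alt_miss matrix target (matrix.length - 1) (by omega) (fun j hj => hall j (by omega))]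
  rcases hdisj with hle2 | hsort | hlast | hallm
  · -- at most two rows: either the first column is sorted, or target ≥ the last head,
    -- or target is below both heads
    rcases matrix with _ | ⟨r0, _ | ⟨r1, _ | ⟨r2, rest⟩⟩⟩
    · exact absurd rfl hne
    · exact Hsort (by simp)
    · by_cases hab : pvC [r0, r1] 0 ≤ pvC [r0, r1] 1
      · refine Hsort ?_
        have h := hab
        simp [pvC, List.getD] at h
        simpa using h
      · by_cases hbt : pvC [r0, r1] 1 ≤ target
        · exact Hlast (by simpa using hbt)
        · refine Hall ?_
          intro j hj
          simp only [List.length_cons, List.length_nil] at hj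
          interval_cases j <;> omega
    · exfalso
      simp at hle2
  · exact Hsort hsort
  · refine Hlast ?_
    have : pvC matrix (matrix.length - 1) = (matrix.map fun r => r.headD 0).getLastD 0 := by
      unfold pvC
      rw [List.getLastD_eq_getLast?, List.getLast?_eq_getElem?]
      rw [List.getD_eq_getElem _ _ (by simp; omega)]
      simp [hn]
    rw [this]; exact hlast
  · refine Hall ?_
    intro j hj
    have hmem : pvC matrix j ∈ matrix.map fun r => r.headD 0 := by
      unfold pvC
      rw [List.getD_eq_getElem _ _ (by simp; omega)]
      exact List.getElem_mem _
    exact hallm _ hmem
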